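-- pv_equiv track=rewrite | github.com/MNNITAK/hack-insightx | repo_check/main.py | generate_corrected_code
-- ===== SOURCE A (Python) =====
-- from typing import Dict, List, Any, Optional, Tuple
--
-- def generate_corrected_code(original_code: str, vulnerabilities: List[Dict]) -> str:
--     """Generate corrected code based on vulnerabilities"""
--     lines = original_code.split('\n')
--
--     # Sort vulnerabilities by line number (reverse) to avoid offset issues
--     sorted_vulns = sorted(vulnerabilities, key=lambda v: int(v.get('line', 0)), reverse=True)
--
--     # Apply fixes line by line
--     for vuln in sorted_vulns:
--         try:
--             line_num = int(vuln.get('line', 0)) - 1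
--             if 0 <= line_num < len(lines) and vuln.get('fixed_code'):
--                 # Add security comment
--                 indent = len(lines[line_num]) - len(lines[line_num].lstrip())
--                 security_comment = ' ' * indent + f'# SECURITY FIX: {vuln.get("type")} - {vuln.get("cwe")}'
--                 lines[line_num] = security_comment + '\n' + vuln['fixed_code']
--         except:
--             pass
--
--     return '\n'.join(lines)
-- ===== SOURCE B (Python) =====
-- def generate_corrected_code(original_code: str, vulnerabilities) -> str:
--     """Generate corrected code based on vulnerabilities"""
--     lines = original_code.split('\n')
--
--     # Index table: line index -> winning vulnerability (last valid entry wins)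
--     fixes = {}
--     for vuln in vulnerabilities:
--         try:
--             line_num = int(vuln.get('line', 0)) - 1
--             if 0 <= line_num < len(lines) and vuln.get('fixed_code'):
--                 fixes[line_num] = vuln
--         except:
--             pass
--
--     # Single forward pass over the lines
--     out = []
--     for i, line in enumerate(lines):
--         vuln = fixes.get(i)
--         if vuln is None:
--             out.append(line)
--         else:
--             indent = len(line) - len(line.lstrip())
--             comment = ' ' * indent + f'# SECURITY FIX: {vuln.get("type")} - {vuln.get("cwe")}'
--             out.append(comment + '\n' + vuln['fixed_code'])
--     return '\n'.join(out)
-- ===== Notes on version B (the rewrite author's own statement) =====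
-- stated objective: simpler
-- what changed: Replaces A's reverse-sort-then-in-place-mutation strategy with an index table mapping line index to the winning vulnerability built in one forward pass, then a single enumerate pass that emits fixed or original lines; no sort and no list mutation.
import Mathlib
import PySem

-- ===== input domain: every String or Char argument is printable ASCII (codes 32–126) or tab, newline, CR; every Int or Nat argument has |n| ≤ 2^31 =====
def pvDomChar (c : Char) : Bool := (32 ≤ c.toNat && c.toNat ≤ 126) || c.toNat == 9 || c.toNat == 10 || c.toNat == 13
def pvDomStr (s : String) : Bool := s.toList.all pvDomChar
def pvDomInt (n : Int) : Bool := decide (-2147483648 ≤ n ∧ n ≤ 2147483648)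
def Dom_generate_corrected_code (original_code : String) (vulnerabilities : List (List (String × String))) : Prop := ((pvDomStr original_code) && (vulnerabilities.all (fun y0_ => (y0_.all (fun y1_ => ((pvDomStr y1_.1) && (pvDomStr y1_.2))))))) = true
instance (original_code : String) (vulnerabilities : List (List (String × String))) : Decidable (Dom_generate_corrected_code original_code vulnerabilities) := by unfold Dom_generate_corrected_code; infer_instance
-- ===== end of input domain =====

-- B replaces A's reverse-sort-and-mutate strategy with an index table (line -> winning fix)
-- built in one forward pass, followed by a single enumerate pass over the lines (objective: simpler).


-- shared semantic helpers (each mirrors one Python expression both versions contain)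
-- int(v.get('line', 0)) : none exactly where Python raises ValueError
def pvLineNum (v : List (String × String)) : Option Int :=
  match (PySem.Dict.ofList v).get? "line" with
  | none => some 0
  | some s => PySem.Int.ofStr? s

-- A's sort key / the value int(v.get('line', 0)) once known to parse
def pvKey (v : List (String × String)) : Int := (pvLineNum v).getD 0

-- truthiness of v.get('fixed_code')
def pvTruthy : Option String → Bool
  | none => false
  | some s => !(s == "")

-- f-string rendering of v.get(k) (None prints as "None")
def pvStr : Option String → String
  | none => "None"
  | some s => s

-- len(line) - len(line.lstrip())
def pvIndent (s : String) : Int := PySem.Str.len s - PySem.Str.len (PySem.Str.lstrip s)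

-- ' '*indent + f'# SECURITY FIX: {type} - {cwe}' + '\n' + v['fixed_code']
def pvFix (indent : Int) (v : List (String × String)) : String :=
  String.ofList (List.replicate indent.toNat ' ') ++ "# SECURITY FIX: " ++
    pvStr ((PySem.Dict.ofList v).get? "type") ++ " - " ++ pvStr ((PySem.Dict.ofList v).get? "cwe") ++
    "\n" ++ ((PySem.Dict.ofList v).get? "fixed_code").getD ""

-- ===== PORT A =====
def generate_corrected_code (original_code : String) (vulnerabilities : List (List (String × String))) : String :=
  let lines := (PySem.Str.split? original_code "\n").getD []   -- sep ≠ "", always some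
  let sorted_vulns := PySem.List.sorted vulnerabilities pvKey true
  let lines := sorted_vulns.foldl (fun ls v =>
    match pvLineNum v with
    | none => ls                    -- except: pass  (unreachable under Pre_)
    | some m =>
      let line_num := m - 1
      if 0 ≤ line_num ∧ line_num < (ls.length : Int) ∧
          pvTruthy ((PySem.Dict.ofList v).get? "fixed_code") = true then
        ls.set line_num.toNat (pvFix (pvIndent (ls.getD line_num.toNat "")) v)
      else ls) lines
  PySem.Str.join "\n" lines

-- ===== PORT B =====
def generate_corrected_code_alt (original_code : String) (vulnerabilities : List (List (String × String))) : String :=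
  let lines := (PySem.Str.split? original_code "\n").getD []   -- sep ≠ "", always some
  let fixes := vulnerabilities.foldl (fun (d : PySem.Dict Int (List (String × String))) v =>
    match pvLineNum v with
    | none => d                     -- except: pass
    | some m =>
      if 0 ≤ m - 1 ∧ m - 1 < (lines.length : Int) ∧
          pvTruthy ((PySem.Dict.ofList v).get? "fixed_code") = true then
        d.insert (m - 1) v
      else d) PySem.Dict.empty
  PySem.Str.join "\n" ((PySem.List.enumerate lines).map (fun p =>
    match fixes.get? p.1 with
    | none => p.2
    | some v => pvFix (pvIndent p.2) v))

-- ===== PRECONDITION & SPEC =====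
-- Pre_ excludes exactly the inputs where Python A raises: a vulnerability whose 'line' value
-- is not int()-parsable makes A's sort key raise ValueError.
def Pre_generate_corrected_code (original_code : String) (vulnerabilities : List (List (String × String))) : Prop :=
  ∀ v ∈ vulnerabilities, (pvLineNum v).isSome = true
instance (original_code : String) (vulnerabilities : List (List (String × String))) : Decidable (Pre_generate_corrected_code original_code vulnerabilities) := by unfold Pre_generate_corrected_code; infer_instance

def pvWitness_generate_corrected_code : String × (List (List (String × String))) :=
  ("x = 1", [[("line", "1"), ("fixed_code", "y = 2"), ("type", "T"), ("cwe", "C")]])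

def Spec_generate_corrected_code (original_code : String) (vulnerabilities : List (List (String × String))) (out : String) : Prop := out = generate_corrected_code_alt original_code vulnerabilities
instance (original_code : String) (vulnerabilities : List (List (String × String))) (out : String) : Decidable (Spec_generate_corrected_code original_code vulnerabilities out) := by unfold Spec_generate_corrected_code; infer_instance

-- ===== CLAIM (what is proved, stated in full; the proofs are below) =====
def Claim_equal_generate_corrected_code : Prop := ∀ (original_code : String) (vulnerabilities : List (List (String × String))), Dom_generate_corrected_code original_code vulnerabilities → Pre_generate_corrected_code original_code vulnerabilities → Spec_generate_corrected_code original_code vulnerabilities (generate_corrected_code original_code vulnerabilities)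

-- ===== LEMMAS AND PROOFS =====

-- the index (as Int) a vulnerability validly targets, given the number of lines
def pvTarget? (n : Nat) (v : List (String × String)) : Option Int :=
  match pvLineNum v with
  | none => none
  | some m =>
    if 0 ≤ m - 1 ∧ m - 1 < (n : Int) ∧ pvTruthy ((PySem.Dict.ofList v).get? "fixed_code") = true
    then some (m - 1) else none

def pvHit (n : Nat) (i : Int) (v : List (String × String)) : Bool := pvTarget? n v == some i

-- A's loop body
def pvStepA (ls : List String) (v : List (String × String)) : List String :=
  match pvLineNum v with
  | none => ls
  | some m =>
    let line_num := m - 1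
    if 0 ≤ line_num ∧ line_num < (ls.length : Int) ∧
        pvTruthy ((PySem.Dict.ofList v).get? "fixed_code") = true then
      ls.set line_num.toNat (pvFix (pvIndent (ls.getD line_num.toNat "")) v)
    else ls

-- B's loop body
def pvStepD (n : Nat) (d : PySem.Dict Int (List (String × String))) (v : List (String × String)) :
    PySem.Dict Int (List (String × String)) :=
  match pvLineNum v with
  | none => d
  | some m =>
    if 0 ≤ m - 1 ∧ m - 1 < (n : Int) ∧ pvTruthy ((PySem.Dict.ofList v).get? "fixed_code") = true
    then d.insert (m - 1) v else d

-- A's effect on a single line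
def pvApply (n : Nat) (i : Int) (s : String) (v : List (String × String)) : String :=
  if pvTarget? n v = some i then pvFix (pvIndent s) v else s

lemma pvStepA_eq_target (ls : List String) (v : List (String × String)) :
    pvStepA ls v = match pvTarget? ls.length v with
      | none => ls
      | some i => ls.set i.toNat (pvFix (pvIndent (ls.getD i.toNat "")) v) := by
  unfold pvStepA pvTarget?
  cases pvLineNum v with
  | none => rfl
  | some m =>
    dsimp only
    by_cases h : 0 ≤ m - 1 ∧ m - 1 < (ls.length : Int) ∧
        pvTruthy ((PySem.Dict.ofList v).get? "fixed_code") = true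
    · rw [if_pos h, if_pos h]
    · rw [if_neg h, if_neg h]

lemma pvStepD_eq_target (n : Nat) (d : PySem.Dict Int (List (String × String))) (v : List (String × String)) :
    pvStepD n d v = match pvTarget? n v with
      | none => d
      | some i => d.insert i v := by
  unfold pvStepD pvTarget?
  cases pvLineNum v with
  | none => rfl
  | some m =>
    dsimp only
    by_cases h : 0 ≤ m - 1 ∧ m - 1 < (n : Int) ∧
        pvTruthy ((PySem.Dict.ofList v).get? "fixed_code") = true
    · rw [if_pos h, if_pos h]
    · rw [if_neg h, if_neg h]

lemma pvTarget?_nonneg {n : Nat} {v : List (String × String)} {i : Int}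
    (h : pvTarget? n v = some i) : 0 ≤ i ∧ i < (n : Int) := by
  unfold pvTarget? at h
  cases hl : pvLineNum v with
  | none => simp [hl] at h
  | some m =>
    simp only [hl] at h
    split at h
    · rename_i hc; cases h; exact ⟨hc.1, hc.2.1⟩
    · cases h

lemma pvTarget?_key {n : Nat} {v : List (String × String)} {i : Int}
    (h : pvTarget? n v = some i) : pvKey v = i + 1 := by
  unfold pvTarget? at h
  cases hl : pvLineNum v with
  | none => simp [hl] at h
  | some m =>
    simp only [hl] at h
    split at h
    · cases h; simp [pvKey, hl]
    · cases h

lemma pvHit_key {n : Nat} {i : Int} {v : List (String × String)}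
    (h : pvHit n i v = true) : pvKey v = i + 1 :=
  pvTarget?_key (by simpa [pvHit] using h)

lemma pvStepA_length (ls : List String) (v : List (String × String)) :
    (pvStepA ls v).length = ls.length := by
  rw [pvStepA_eq_target]
  cases pvTarget? ls.length v <;> simp

lemma pvFoldA_length (vs : List (List (String × String))) (ls : List String) :
    (vs.foldl pvStepA ls).length = ls.length := by
  induction vs generalizing ls with
  | nil => rfl
  | cons v vs ih => simp [List.foldl_cons, ih, pvStepA_length]

lemma pvIndent_nonneg (s : String) : 0 ≤ pvIndent s := by
  have h : (PySem.Chars.lstrip s.toList).length ≤ s.toList.length := by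
    simpa [PySem.Chars.lstrip] using List.length_dropWhile_le PySem.Chars.isspace s.toList
  unfold pvIndent
  rw [PySem.Str.len_eq, PySem.Str.len_eq, PySem.Str.toList_lstrip]
  omega

lemma pvLstrip_rep (n : Nat) (r : List Char) :
    PySem.Chars.lstrip (List.replicate n ' ' ++ '#' :: r) = '#' :: r := by
  induction n with
  | zero =>
    simp [PySem.Chars.lstrip, (by decide : PySem.Chars.isspace '#' = false)]
  | succ n ih =>
    simpa [PySem.Chars.lstrip, List.replicate_succ, List.dropWhile_cons,
      (by decide : PySem.Chars.isspace ' ' = true)] using ih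

-- applying a fix preserves the indentation count
lemma pvIndent_fix (s : String) (v : List (String × String)) :
    pvIndent (pvFix (pvIndent s) v) = pvIndent s := by
  have hnn := pvIndent_nonneg s
  have htl : (pvFix (pvIndent s) v).toList =
      List.replicate (pvIndent s).toNat ' ' ++ ('#' ::
        (" SECURITY FIX: " ++ pvStr ((PySem.Dict.ofList v).get? "type") ++ " - " ++
          pvStr ((PySem.Dict.ofList v).get? "cwe") ++ "\n" ++
          ((PySem.Dict.ofList v).get? "fixed_code").getD "").toList) := by
    simp [pvFix, String.toList_append]
  have key : ∀ t : String, pvIndent t =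
      (t.toList.length : Int) - ((PySem.Chars.lstrip t.toList).length : Int) := by
    intro t
    unfold pvIndent
    rw [PySem.Str.len_eq, PySem.Str.len_eq, PySem.Str.toList_lstrip]
  rw [key (pvFix (pvIndent s) v), htl, pvLstrip_rep]
  simp only [List.length_append, List.length_replicate, List.length_cons]
  omega

-- pointwise decomposition of A's loop body
lemma pvStepA_getD (ls : List String) (v : List (String × String)) (i : Nat) :
    (pvStepA ls v).getD i "" = pvApply ls.length (i : Int) (ls.getD i "") v := by
  rw [pvStepA_eq_target]
  unfold pvApply
  cases ht : pvTarget? ls.length v with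
  | none =>
    dsimp only
    rw [if_neg (by simp : ¬ (none : Option Int) = some (i : Int))]
  | some j =>
    obtain ⟨hj0, hjn⟩ := pvTarget?_nonneg ht
    dsimp only
    by_cases hij : j = (i : Int)
    · subst hij
      rw [if_pos rfl]
      have hti : ((i : Int)).toNat = i := Int.toNat_natCast i
      rw [hti]
      simp only [List.getD_eq_getElem?_getD, List.getElem?_set]
      have hilt : i < ls.length := by omega
      simp [hilt]
    · rw [if_neg (by simpa using hij)]
      have : j.toNat ≠ i := by omega
      simp only [List.getD_eq_getElem?_getD, List.getElem?_set]
      simp [this]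

lemma pvFoldA_getD (vs : List (List (String × String))) (ls : List String) (i : Nat) :
    (vs.foldl pvStepA ls).getD i "" = vs.foldl (pvApply ls.length (i : Int)) (ls.getD i "") := by
  induction vs generalizing ls with
  | nil => rfl
  | cons v vs ih =>
    simp only [List.foldl_cons]
    rw [ih (pvStepA ls v), pvStepA_length, pvStepA_getD ls v i]

-- a chain of per-line applications is decided by the last hit
lemma pvApplyChain (n : Nat) (i : Int) (vs : List (List (String × String))) (s : String) :
    vs.foldl (pvApply n i) s = match (vs.filter (pvHit n i)).getLast? with
      | none => s
      | some v => pvFix (pvIndent s) v := by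
  induction vs generalizing s with
  | nil => rfl
  | cons v vs ih =>
    simp only [List.foldl_cons, List.filter_cons]
    by_cases h : pvHit n i v = true
    · have ht : pvTarget? n v = some i := by simpa [pvHit] using h
      have happ : pvApply n i s v = pvFix (pvIndent s) v := by
        unfold pvApply; rw [if_pos ht]
      rw [h, if_pos rfl, ih, happ, List.getLast?_cons]
      cases hlast : (vs.filter (pvHit n i)).getLast? with
      | none => simp
      | some w => simp [pvIndent_fix]
    · have ht : ¬ pvTarget? n v = some i := by
        intro hc; exact h (by simp [pvHit, hc])
      have happ : pvApply n i s v = s := by unfold pvApply; rw [if_neg ht]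
      rw [if_neg (by simpa using h), ih, happ]

-- stability of the reverse sort on a key class: filtering by a predicate that forces a single
-- key value commutes with inserting into a descending-sorted list
lemma pvFilter_insertBy {α κ : Type} [LinearOrder κ] (key : α → κ) (p : α → Bool) (c : κ)
    (hp : ∀ v, p v = true → key v = c) (x : α) (ys : List α)
    (hs : ys.Pairwise (fun a b => key b ≤ key a)) :
    (PySem.List.insertBy (fun a b => decide (key b < key a)) x ys).filter p =
      ys.filter p ++ (if p x then [x] else []) := by
  induction ys with
  | nil => cases hpx : p x <;> simp [PySem.List.insertBy, hpx]
  | cons y ys ih =>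
    rw [List.pairwise_cons] at hs
    obtain ⟨hy, hs'⟩ := hs
    by_cases hb : key y < key x
    · rw [show PySem.List.insertBy (fun a b => decide (key b < key a)) x (y :: ys) =
          x :: y :: ys by simp [PySem.List.insertBy, hb]]
      cases hpx : p x with
      | false => simp [List.filter_cons, hpx]
      | true =>
        have hkx := hp x hpx
        have hnone : (y :: ys).filter p = [] := by
          rw [List.filter_eq_nil_iff]
          intro z hz hpz
          have hkz := hp z hpz
          have hlez : key z ≤ key y := by
            rcases List.mem_cons.mp hz with h | h
            · subst h; exact le_refl _
            · exact hy z h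
          exact absurd (hkz.trans hkx.symm) (ne_of_lt (lt_of_le_of_lt hlez hb))
        simp [List.filter_cons, hpx, hnone]
    · rw [show PySem.List.insertBy (fun a b => decide (key b < key a)) x (y :: ys) =
          y :: PySem.List.insertBy (fun a b => decide (key b < key a)) x ys by
            simp [PySem.List.insertBy, hb]]
      rw [List.filter_cons, List.filter_cons, ih hs']
      cases hpy : p y <;> simp [hpy]

lemma pvFilter_sorted {α κ : Type} [LinearOrder κ] (key : α → κ) (p : α → Bool) (c : κ)
    (hp : ∀ v, p v = true → key v = c) (xs : List α) :
    (PySem.List.sorted xs key true).filter p = xs.filter p := by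
  induction xs using List.reverseRecOn with
  | nil => rfl
  | append_singleton xs x ih =>
    rw [PySem.List.sorted_rev_eq_foldl_insertBy, List.foldl_append]
    simp only [List.foldl_cons, List.foldl_nil]
    rw [← PySem.List.sorted_rev_eq_foldl_insertBy]
    rw [pvFilter_insertBy key p c hp x _ (PySem.List.sorted_pairwise_rev xs key)]
    rw [ih, List.filter_append]
    cases h : p x <;> simp [h]

-- B's dictionary lookup is decided by the last hit
lemma pvFoldD_get? (n : Nat) (vs : List (List (String × String)))
    (d : PySem.Dict Int (List (String × String))) (j : Int) :
    (vs.foldl (pvStepD n) d).get? j = match (vs.filter (pvHit n j)).getLast? with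
      | some v => some v
      | none => d.get? j := by
  induction vs generalizing d with
  | nil => rfl
  | cons v vs ih =>
    simp only [List.foldl_cons, List.filter_cons]
    rw [pvStepD_eq_target]
    cases ht : pvTarget? n v with
    | none =>
      have : pvHit n j v = false := by simp [pvHit, ht]
      rw [this, if_neg (by simp), ih]
    | some k =>
      by_cases hk : k = j
      · subst hk
        have : pvHit n k v = true := by simp [pvHit, ht]
        rw [this, if_pos rfl, ih, List.getLast?_cons]
        cases hlast : (vs.filter (pvHit n k)).getLast? with
        | none => simp [PySem.Dict.get?_insert_self]
        | some w => simp
      · have : pvHit n j v = false := by simp [pvHit, ht, hk]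
        rw [this, if_neg (by simp), ih]
        cases (vs.filter (pvHit n j)).getLast? with
        | none => exact PySem.Dict.get?_insert_of_ne d v (fun hc => hk hc.symm)
        | some w => rfl

-- the whole pipeline, over an arbitrary list of lines
lemma pvMain (lines : List String) (vs : List (List (String × String))) :
    List.foldl pvStepA lines (PySem.List.sorted vs pvKey true) =
      (PySem.List.enumerate lines).map (fun p =>
        match (vs.foldl (pvStepD lines.length) PySem.Dict.empty).get? p.1 with
        | none => p.2
        | some v => pvFix (pvIndent p.2) v) := by
  apply List.ext_getElem
  · rw [pvFoldA_length]
    simp [PySem.List.length_enumerate]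
  · intro i h1 h2
    have hiln : i < lines.length := by rwa [pvFoldA_length] at h1
    -- left side
    have hL : (List.foldl pvStepA lines (PySem.List.sorted vs pvKey true)).getD i "" =
        match (vs.filter (pvHit lines.length (i : Int))).getLast? with
        | none => lines.getD i ""
        | some v => pvFix (pvIndent (lines.getD i "")) v := by
      rw [pvFoldA_getD, pvApplyChain,
        pvFilter_sorted pvKey (pvHit lines.length (i : Int)) ((i : Int) + 1)
          (fun v hv => pvHit_key hv) vs]
    -- right side
    have hR : ((PySem.List.enumerate lines).map (fun p =>
        match (vs.foldl (pvStepD lines.length) PySem.Dict.empty).get? p.1 with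
        | none => p.2
        | some v => pvFix (pvIndent p.2) v)).getD i "" =
        match (vs.filter (pvHit lines.length (i : Int))).getLast? with
        | none => lines.getD i ""
        | some v => pvFix (pvIndent (lines.getD i "")) v := by
      rw [List.getD_eq_getElem?_getD, List.getElem?_map, PySem.List.getElem?_enumerate]
      have hget : lines[i]? = some lines[i] := List.getElem?_eq_getElem hiln
      rw [hget]
      simp only [Option.map_some, Option.getD_some]
      rw [pvFoldD_get? lines.length vs PySem.Dict.empty ((0 : Int) + (i : Int))]
      have hzero : (0 : Int) + (i : Int) = (i : Int) := by omega
      rw [hzero]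
      cases (vs.filter (pvHit lines.length (i : Int))).getLast? with
      | none =>
        simp only [PySem.Dict.get?_empty]
        rw [List.getD_eq_getElem _ _ hiln]
      | some w => rw [List.getD_eq_getElem _ _ hiln]
    rw [← List.getD_eq_getElem _ "" h1, ← List.getD_eq_getElem _ "" h2, hL, hR]

-- ===== VERDICT (by name: the statement is the Claim_ definition above) =====
theorem generate_corrected_code_spec : Claim_equal_generate_corrected_code := by
  intro oc vs _ _
  unfold Spec_generate_corrected_code generate_corrected_code generate_corrected_code_alt
  exact congrArg (PySem.Str.join "\n") (pvMain ((PySem.Str.split? oc "\n").getD []) vs)
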